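-- pv_equiv track=rewrite | github.com/shodan1q/zeroapp | zerodev/generator/dependency_checker.py | _insert_dep
-- ===== SOURCE A (Python) =====
-- def _insert_dep(content: str, name: str, version: str) -> str:
--     """Insert a single dependency line after the ``dependencies:`` header."""
--     lines = content.splitlines()
--     result: list[str] = []
--     inserted = False
--
--     for i, line in enumerate(lines):
--         result.append(line)
--         if not inserted and line.strip() == "dependencies:":
--             if version.startswith("sdk:"):
--                 result.append(f"  {name}:")
--                 result.append(f"    {version}")
--             else:
--                 result.append(f"  {name}: {version}")
--             inserted = True
--
--     if not inserted:
--         result.append("")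
--         result.append("dependencies:")
--         if version.startswith("sdk:"):
--             result.append(f"  {name}:")
--             result.append(f"    {version}")
--         else:
--             result.append(f"  {name}: {version}")
--
--     return "\n".join(result)
-- ===== SOURCE B (Python) =====
-- def _insert_dep(content: str, name: str, version: str) -> str:
--     """Insert a single dependency line after the ``dependencies:`` header."""
--     lines = content.splitlines()
--     if version.startswith("sdk:"):
--         dep_lines = [f"  {name}:", f"    {version}"]
--     else:
--         dep_lines = [f"  {name}: {version}"]
--     i = next((k for k, line in enumerate(lines) if line.strip() == "dependencies:"), None)
--     if i is None:
--         lines = lines + ["", "dependencies:"] + dep_lines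
--     else:
--         lines = lines[:i + 1] + dep_lines + lines[i + 1:]
--     return "\n".join(lines)
-- ===== Notes on version B (the rewrite author's own statement) =====
-- stated objective: simpler
-- what changed: Replaces A's flag-carrying accumulator loop (result list + inserted boolean threaded through every line) by building the dependency block once, locating the first 'dependencies:' header with a single index search, and assembling the result by slice concatenation.
import Mathlib
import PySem

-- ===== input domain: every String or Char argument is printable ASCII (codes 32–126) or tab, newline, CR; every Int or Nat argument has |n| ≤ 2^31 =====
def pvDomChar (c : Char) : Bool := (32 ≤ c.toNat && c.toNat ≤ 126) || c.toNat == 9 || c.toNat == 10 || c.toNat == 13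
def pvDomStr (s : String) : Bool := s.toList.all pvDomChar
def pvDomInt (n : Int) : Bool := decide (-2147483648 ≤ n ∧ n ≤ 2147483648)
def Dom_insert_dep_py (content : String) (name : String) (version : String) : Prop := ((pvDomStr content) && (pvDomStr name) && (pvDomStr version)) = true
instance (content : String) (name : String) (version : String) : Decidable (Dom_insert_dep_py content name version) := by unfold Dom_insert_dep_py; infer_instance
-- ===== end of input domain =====

-- B replaces A's flag-carrying accumulator loop by a single index search plus slice
-- concatenation (objective: simpler decomposition, same cost).

-- ===== PORT A =====
-- A's loop: result/inserted state threaded through the lines (the Python loop index i is unused).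
def insert_dep_py (content : String) (name : String) (version : String) : String :=
  let lines := PySem.Str.splitlines content
  let st :=
    lines.foldl (fun (st : List String × Bool) line =>
      let result := st.1 ++ [line]
      if !st.2 && (PySem.Str.strip line == "dependencies:") then
        if PySem.Str.startswith version "sdk:" then
          (result ++ [PySem.Str.join "" ["  ", name, ":"], PySem.Str.join "" ["    ", version]], true)
        else
          (result ++ [PySem.Str.join "" ["  ", name, ": ", version]], true)
      else (result, st.2)) ([], false)
  let result :=
    if !st.2 then
      st.1 ++ ["", "dependencies:"] ++
        (if PySem.Str.startswith version "sdk:" then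
          [PySem.Str.join "" ["  ", name, ":"], PySem.Str.join "" ["    ", version]]
        else
          [PySem.Str.join "" ["  ", name, ": ", version]])
    else st.1
  PySem.Str.join "\n" result

-- ===== PORT B =====
def insert_dep_py_alt (content : String) (name : String) (version : String) : String :=
  let lines := PySem.Str.splitlines content
  let depLines :=
    if PySem.Str.startswith version "sdk:" then
      [PySem.Str.join "" ["  ", name, ":"], PySem.Str.join "" ["    ", version]]
    else
      [PySem.Str.join "" ["  ", name, ": ", version]]
  match lines.findIdx? (fun line => PySem.Str.strip line == "dependencies:") with
  | some i => PySem.Str.join "\n" (lines.take (i + 1) ++ depLines ++ lines.drop (i + 1))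
  | none => PySem.Str.join "\n" (lines ++ ["", "dependencies:"] ++ depLines)

-- ===== PRECONDITION & SPEC =====
def Spec_insert_dep_py (content : String) (name : String) (version : String) (out : String) : Prop := out = insert_dep_py_alt content name version
instance (content : String) (name : String) (version : String) (out : String) : Decidable (Spec_insert_dep_py content name version out) := by unfold Spec_insert_dep_py; infer_instance

-- ===== CLAIM (what is proved, stated in full; the proofs are below) =====
def Claim_equal_insert_dep_py : Prop := ∀ (content : String) (name : String) (version : String), Dom_insert_dep_py content name version → Spec_insert_dep_py content name version (insert_dep_py content name version)

-- ===== LEMMAS AND PROOFS =====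

-- A's loop body, with the dependency block abstracted as `dep`.
def pvStep (P : String → Bool) (dep : List String) (st : List String × Bool) (line : String) : List String × Bool :=
  let result := st.1 ++ [line]
  if !st.2 && P line then (result ++ dep, true) else (result, st.2)

-- Once inserted = true, A's loop only appends the remaining lines.
theorem pv_loop_true (P : String → Bool) (dep : List String) (lines : List String)
    (acc : List String) :
    lines.foldl (pvStep P dep) (acc, true) = (acc ++ lines, true) := by
  induction lines generalizing acc with
  | nil => simp
  | cons l ls ih =>
    rw [List.foldl_cons]
    show ls.foldl (pvStep P dep) (pvStep P dep (acc, true) l) = _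
    have : pvStep P dep (acc, true) l = (acc ++ [l], true) := by simp [pvStep]
    rw [this, ih]
    simp

-- A's loop, characterised by the first index at which P holds.
theorem pv_loop_eq (P : String → Bool) (dep : List String) (lines : List String)
    (acc : List String) :
    lines.foldl (pvStep P dep) (acc, false)
    = (match lines.findIdx? P with
       | some i => (acc ++ lines.take (i + 1) ++ dep ++ lines.drop (i + 1), true)
       | none => (acc ++ lines, false)) := by
  induction lines generalizing acc with
  | nil => simp
  | cons l ls ih =>
    rw [List.foldl_cons, List.findIdx?_cons]
    by_cases h : P l = true
    · have hs : pvStep P dep (acc, false) l = (acc ++ [l] ++ dep, true) := by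
        simp [pvStep, h]
      rw [hs, pv_loop_true]
      simp [h]
    · have hs : pvStep P dep (acc, false) l = (acc ++ [l], false) := by
        simp [pvStep, h]
      rw [hs, ih]
      simp only [h, if_false, Bool.false_eq_true]
      cases hf : ls.findIdx? P with
      | none => simp
      | some i => simp

-- ===== VERDICT (by name: the statement is the Claim_ definition above) =====
theorem insert_dep_py_spec : Claim_equal_insert_dep_py := by
  intro content name version _
  simp only [Spec_insert_dep_py, insert_dep_py, insert_dep_py_alt]
  have hfn : (fun (st : List String × Bool) line =>
      let result := st.1 ++ [line]
      if !st.2 && (PySem.Str.strip line == "dependencies:") then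
        if PySem.Str.startswith version "sdk:" then
          (result ++ [PySem.Str.join "" ["  ", name, ":"], PySem.Str.join "" ["    ", version]], true)
        else
          (result ++ [PySem.Str.join "" ["  ", name, ": ", version]], true)
      else (result, st.2))
    = pvStep (fun line => PySem.Str.strip line == "dependencies:")
        (if PySem.Str.startswith version "sdk:" then
          [PySem.Str.join "" ["  ", name, ":"], PySem.Str.join "" ["    ", version]]
        else [PySem.Str.join "" ["  ", name, ": ", version]]) := by
    funext st line
    simp only [pvStep]
    split_ifs <;> simp_all
  rw [hfn, pv_loop_eq]
  cases hf : (PySem.Str.splitlines content).findIdx?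
      (fun line => PySem.Str.strip line == "dependencies:") with
  | none => simp
  | some i => simp
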